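-- pv_equiv track=rewrite | github.com/AimadOufares/uca_digital_assistant | rag_module/rag_search.py | truncate_chunks
-- ===== SOURCE A (Python) =====
-- from typing import List, Dict, Optional
--
-- MAX_CONTEXT_CHARS = 2500
--
-- def truncate_chunks(chunks_list: List[Dict], max_chars: int = MAX_CONTEXT_CHARS) -> List[Dict]:
--     """Limite la taille totale du contexte envoyé au LLM"""
--     total = 0
--     selected = []
--     for c in chunks_list:
--         text = c.get("text", "")
--         if total + len(text) > max_chars:
--             break
--         selected.append(c)
--         total += len(text)
--     return selected
-- ===== SOURCE B (Python) =====
-- from itertools import accumulate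
-- from bisect import bisect_right
--
-- MAX_CONTEXT_CHARS = 2500
--
-- def truncate_chunks(chunks_list, max_chars=MAX_CONTEXT_CHARS):
--     """Limite la taille totale du contexte envoyé au LLM"""
--     totals = list(accumulate(len(c.get("text", "")) for c in chunks_list))
--     cutoff = bisect_right(totals, max_chars)
--     return chunks_list[:cutoff]
-- ===== Notes on version B (the rewrite author's own statement) =====
-- stated objective: alternative
-- what changed: Replaces the incremental accumulate-and-break loop with a precomputed inclusive prefix-sum table (itertools.accumulate) and a bisect_right boundary search, returning a slice of the leading chunks.
import Mathlib
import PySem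

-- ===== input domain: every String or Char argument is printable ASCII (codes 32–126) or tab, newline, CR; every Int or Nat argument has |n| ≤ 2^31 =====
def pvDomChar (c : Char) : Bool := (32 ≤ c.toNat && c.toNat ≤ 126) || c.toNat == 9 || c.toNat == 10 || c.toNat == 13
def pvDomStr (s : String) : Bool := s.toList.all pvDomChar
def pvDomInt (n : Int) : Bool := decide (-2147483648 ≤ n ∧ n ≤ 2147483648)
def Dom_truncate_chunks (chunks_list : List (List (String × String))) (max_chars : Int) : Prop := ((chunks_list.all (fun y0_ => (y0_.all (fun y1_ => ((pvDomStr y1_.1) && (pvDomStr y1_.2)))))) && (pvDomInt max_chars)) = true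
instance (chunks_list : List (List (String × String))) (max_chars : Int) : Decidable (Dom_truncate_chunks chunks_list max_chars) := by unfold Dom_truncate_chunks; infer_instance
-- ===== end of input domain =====

-- B keeps the same O(n) cost but a different decomposition: a prefix-sum table plus a
-- boundary search and a slice, instead of A's accumulate-and-break loop.

-- dict.get("text", "") on the association-list representation: first match or default
def pyGetText (c : List (String × String)) : String :=
  ((c.find? (fun p => p.1 == "text")).map (·.2)).getD ""

-- ===== PORT A =====
-- the for-loop with break: carries the running `total`, stops at the first chunk that
-- would push the total past max_chars, otherwise appends the chunk and continues
def truncAuxA (max_chars : Int) (total : Int) :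
    List (List (String × String)) → List (List (String × String))
  | [] => []
  | c :: rest =>
    let text := pyGetText c
    if total + PySem.Str.len text > max_chars then []
    else c :: truncAuxA max_chars (total + PySem.Str.len text) rest

def truncate_chunks (chunks_list : List (List (String × String))) (max_chars : Int) : List (List (String × String)) :=
  truncAuxA max_chars 0 chunks_list

-- ===== PORT B =====
-- itertools.accumulate: inclusive prefix sums of a list of Ints starting from s
def pyAccumulate (s : Int) : List Int → List Int
  | [] => []
  | x :: xs => (s + x) :: pyAccumulate (s + x) xs

-- bisect.bisect_right on a sorted list = number of elements ≤ the key (its contract)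
def pyBisectRight (totals : List Int) (key : Int) : Nat :=
  totals.countP (fun s => decide (s ≤ key))

def truncate_chunks_alt (chunks_list : List (List (String × String))) (max_chars : Int) : List (List (String × String)) :=
  let totals := pyAccumulate 0 (chunks_list.map (fun c => PySem.Str.len (pyGetText c)))
  let cutoff := pyBisectRight totals max_chars
  chunks_list.take cutoff

-- ===== PRECONDITION & SPEC =====
def Spec_truncate_chunks (chunks_list : List (List (String × String))) (max_chars : Int) (out : List (List (String × String))) : Prop := out = truncate_chunks_alt chunks_list max_chars
instance (chunks_list : List (List (String × String))) (max_chars : Int) (out : List (List (String × String))) : Decidable (Spec_truncate_chunks chunks_list max_chars out) := by unfold Spec_truncate_chunks; infer_instance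

-- ===== CLAIM (what is proved, stated in full; the proofs are below) =====
def Claim_equal_truncate_chunks : Prop := ∀ (chunks_list : List (List (String × String))) (max_chars : Int), Dom_truncate_chunks chunks_list max_chars → Spec_truncate_chunks chunks_list max_chars (truncate_chunks chunks_list max_chars)

-- ===== LEMMAS AND PROOFS =====

theorem str_len_nonneg (s : String) : 0 ≤ PySem.Str.len s := by
  simp [PySem.Str.len_eq]

-- once the running total exceeds the key, no later prefix sum of nonnegative items is ≤ key
theorem countP_accumulate_zero (key : Int) (xs : List Int) (hxs : ∀ x ∈ xs, 0 ≤ x) :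
    ∀ s : Int, key < s → (pyAccumulate s xs).countP (fun t => decide (t ≤ key)) = 0 := by
  induction xs with
  | nil => intro s _; simp [pyAccumulate]
  | cons x xs ih =>
    intro s hs
    have hx : 0 ≤ x := hxs x (by simp)
    have h1 : key < s + x := by omega
    simp only [pyAccumulate, List.countP_cons]
    rw [ih (fun y hy => hxs y (by simp [hy])) (s + x) h1]
    simp [not_le.mpr h1]

-- the main invariant: A's loop from running total t equals taking the bisect_right cutoff
-- of the prefix sums started at t
theorem truncAuxA_eq (max_chars : Int) (chunks : List (List (String × String))) :
    ∀ t : Int,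
      truncAuxA max_chars t chunks =
        chunks.take ((pyAccumulate t (chunks.map (fun c => PySem.Str.len (pyGetText c)))).countP
          (fun s => decide (s ≤ max_chars))) := by
  induction chunks with
  | nil => intro t; simp [truncAuxA, pyAccumulate]
  | cons c rest ih =>
    intro t
    set ℓ := PySem.Str.len (pyGetText c) with hℓ
    have hnn : ∀ x ∈ rest.map (fun c => PySem.Str.len (pyGetText c)), (0:Int) ≤ x := by
      intro x hx; simp only [List.mem_map] at hx; obtain ⟨c', _, rfl⟩ := hx
      exact str_len_nonneg _
    simp only [truncAuxA, List.map_cons, pyAccumulate, List.countP_cons, ← hℓ]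
    by_cases h : t + ℓ > max_chars
    · have h0 := countP_accumulate_zero max_chars
        (rest.map (fun c => PySem.Str.len (pyGetText c))) hnn (t + ℓ) (by omega)
      rw [if_pos h, h0]
      simp [not_le.mpr h]
    · rw [if_neg h, ih (t + ℓ)]
      have hd : (decide (t + ℓ ≤ max_chars)) = true := by simp; omega
      rw [hd, if_pos rfl, List.take_succ_cons]

-- ===== VERDICT (by name: the statement is the Claim_ definition above) =====
theorem truncate_chunks_spec : Claim_equal_truncate_chunks := by
  intro chunks_list max_chars _
  unfold Spec_truncate_chunks truncate_chunks truncate_chunks_alt pyBisectRight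
  exact truncAuxA_eq max_chars chunks_list 0
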